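-- pv_equiv track=rewrite | github.com/joaodrmacas/FP-Course | Exercises/Cap 4/9.py | reconhece
-- ===== SOURCE A (Python) =====
-- def reconhece(string):
--     if not isinstance(string, str):
--         raise TypeError("not a string")
--
--     if len(string) == 0:
--         return False
--
--     i = 0
--     while i < len(string) and string[i] in 'ABCD':
--         i += 1
--     if i == 0 or i == len(string):
--         return False
--     while i < len(string) and string[i] in '1234':
--         i += 1
--     return i == len(string)
-- ===== SOURCE B (Python) =====
-- def reconhece(string):
--     if not isinstance(string, str):
--         raise TypeError("not a string")
--     if not string:
--         return False
--     if string[0] not in 'ABCD':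
--         return False
--     if string[-1] not in '1234':
--         return False
--     if any(c not in 'ABCD1234' for c in string):
--         return False
--     return all(not (a in '1234' and b in 'ABCD') for a, b in zip(string, string[1:]))
-- ===== Notes on version B (the rewrite author's own statement) =====
-- stated objective: alternative
-- what changed: Replaces the two-phase index-based while-loop scanner with a single-pass local characterization: first char in ABCD, last char in 1234, every char in the alphabet, and no digit immediately followed by a letter.
import Mathlib
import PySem

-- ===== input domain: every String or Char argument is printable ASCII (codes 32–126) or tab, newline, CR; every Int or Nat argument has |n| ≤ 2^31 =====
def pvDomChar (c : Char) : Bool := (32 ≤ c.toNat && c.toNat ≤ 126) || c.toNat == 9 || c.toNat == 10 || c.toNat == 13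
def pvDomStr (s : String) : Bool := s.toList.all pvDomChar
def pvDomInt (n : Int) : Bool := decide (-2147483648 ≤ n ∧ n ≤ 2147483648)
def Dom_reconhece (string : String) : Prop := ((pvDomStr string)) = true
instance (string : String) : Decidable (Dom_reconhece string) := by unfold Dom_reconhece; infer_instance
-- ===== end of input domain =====

-- B replaces A's two-phase while-loop scanner by a single-pass local (adjacency) characterization; alternative, same cost.
-- A raises TypeError only for non-str arguments, which the type convention excludes; both ports are total.

-- ===== PORT A =====
-- membership in the literal strings 'ABCD' / '1234'
def pvL (c : Char) : Bool := ['A', 'B', 'C', 'D'].contains c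
def pvDg (c : Char) : Bool := ['1', '2', '3', '4'].contains c

-- first while loop: advance i while i < len and string[i] in 'ABCD' (short-circuit `and`)
def pvWhileL (cs : List Char) (i : Nat) : Nat :=
  if h : i < cs.length then
    if pvL cs[i] then pvWhileL cs (i + 1) else i
  else i
termination_by cs.length - i

-- second while loop: advance i while i < len and string[i] in '1234'
def pvWhileD (cs : List Char) (i : Nat) : Nat :=
  if h : i < cs.length then
    if pvDg cs[i] then pvWhileD cs (i + 1) else i
  else i
termination_by cs.length - i

def reconhece (string : String) : Bool :=
  let cs := string.toList
  if cs.length = 0 then false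
  else
    let i := pvWhileL cs 0
    if i = 0 ∨ i = cs.length then false
    else pvWhileD cs i == cs.length

-- ===== PORT B =====
def reconhece_alt (string : String) : Bool :=
  let cs := string.toList
  if cs.isEmpty then false
  else if !(match cs.head? with | some c => pvL c | none => false) then false
  else if !(match cs.getLast? with | some c => pvDg c | none => false) then false
  else if cs.any (fun c => !(pvL c || pvDg c)) then false
  else (cs.zip cs.tail).all (fun p => !(pvDg p.1 && pvL p.2))

-- ===== PRECONDITION & SPEC =====
def Spec_reconhece (string : String) (out : Bool) : Prop := out = reconhece_alt string
instance (string : String) (out : Bool) : Decidable (Spec_reconhece string out) := by unfold Spec_reconhece; infer_instance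

-- ===== CLAIM (what is proved, stated in full; the proofs are below) =====
def Claim_equal_reconhece : Prop := ∀ (string : String), Dom_reconhece string → Spec_reconhece string (reconhece string)

-- ===== LEMMAS AND PROOFS =====

theorem pvLD_disjoint (c : Char) : pvL c = true → pvDg c = false := by
  intro h
  simp [pvL, List.contains_eq_mem] at h
  rcases h with h | h | h | h <;> subst h <;> decide

theorem pvWhileL_eq (cs : List Char) (i : Nat) :
    pvWhileL cs i = i + ((cs.drop i).takeWhile pvL).length := by
  rw [pvWhileL]
  split
  · rename_i hi
    have hdrop : cs.drop i = cs[i] :: cs.drop (i + 1) := List.drop_eq_getElem_cons hi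
    by_cases hc : pvL cs[i] = true
    · rw [if_pos hc, pvWhileL_eq cs (i + 1), hdrop, List.takeWhile_cons, hc]
      simp; omega
    · rw [if_neg hc, hdrop, List.takeWhile_cons]
      simp [Bool.eq_false_iff.mpr hc]
  · rename_i hi
    have : cs.drop i = [] := List.drop_eq_nil_of_le (by omega)
    simp [this]
termination_by cs.length - i

theorem pvWhileD_eq (cs : List Char) (i : Nat) :
    pvWhileD cs i = i + ((cs.drop i).takeWhile pvDg).length := by
  rw [pvWhileD]
  split
  · rename_i hi
    have hdrop : cs.drop i = cs[i] :: cs.drop (i + 1) := List.drop_eq_getElem_cons hi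
    by_cases hc : pvDg cs[i] = true
    · rw [if_pos hc, pvWhileD_eq cs (i + 1), hdrop, List.takeWhile_cons, hc]
      simp; omega
    · rw [if_neg hc, hdrop, List.takeWhile_cons]
      simp [Bool.eq_false_iff.mpr hc]
  · rename_i hi
    have : cs.drop i = [] := List.drop_eq_nil_of_le (by omega)
    simp [this]
termination_by cs.length - i

-- B's tail condition (last in digits, alphabet check, adjacency) expressed via A's dropWhile remainder
def pvLastD (cs : List Char) : Bool :=
  match cs.getLast? with | some c => pvDg c | none => false

def pvTailB (cs : List Char) : Bool :=
  pvLastD cs && cs.all (fun c => pvL c || pvDg c) &&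
    (cs.zip cs.tail).all (fun p => !(pvDg p.1 && pvL p.2))

theorem pvTailB_eq (cs : List Char) :
    pvTailB cs = (!(cs.dropWhile pvL).isEmpty && (cs.dropWhile pvL).all pvDg) := by
  induction cs with
  | nil => simp [pvTailB, pvLastD]
  | cons c cs ih =>
    by_cases hL : pvL c = true
    · have hD : pvDg c = false := pvLD_disjoint c hL
      cases cs with
      | nil => simp [pvTailB, pvLastD, hL, hD]
      | cons d cs' =>
        have h1 : pvTailB (c :: d :: cs') = pvTailB (d :: cs') := by
          simp [pvTailB, pvLastD, hL, hD]
        rw [h1, ih]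
        simp [List.dropWhile_cons, hL]
    · have hL' : pvL c = false := Bool.eq_false_iff.mpr hL
      rw [List.dropWhile_cons, hL']
      by_cases hD : pvDg c = true
      · -- head is a digit; B's condition must equal (c::cs).all pvDg
        simp only [Bool.false_eq_true, if_false, List.isEmpty_cons, Bool.not_false,
          Bool.true_and, List.all_cons, hD]
        cases cs with
        | nil => simp [pvTailB, pvLastD, hD, hL']
        | cons d cs' =>
          by_cases hLd : pvL d = true
          · -- adjacency pair (c,d) fails, and d cannot be a digit
            have hDd : pvDg d = false := pvLD_disjoint d hLd
            simp [pvTailB, hD, hLd, hDd]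
          · have hLd' : pvL d = false := Bool.eq_false_iff.mpr hLd
            have h1 : pvTailB (c :: d :: cs') = pvTailB (d :: cs') := by
              simp [pvTailB, pvLastD, hD, hLd']
            rw [h1, ih, List.dropWhile_cons, hLd']
            simp
      · have hD' : pvDg c = false := Bool.eq_false_iff.mpr hD
        simp [pvTailB, hD', hL']

theorem drop_takeWhile_length (cs : List Char) (p : Char → Bool) :
    cs.drop (cs.takeWhile p).length = cs.dropWhile p := by
  induction cs with
  | nil => simp
  | cons c cs ih =>
    by_cases hc : p c = true
    · simp [hc, ih]
    · simp [Bool.eq_false_iff.mpr hc]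

theorem any_not_eq_not_all (cs : List Char) :
    (cs.any fun c => !(pvL c || pvDg c)) = !cs.all (fun c => pvL c || pvDg c) := by
  induction cs with
  | nil => simp
  | cons c cs ih =>
    rw [List.any_cons, List.all_cons, ih]
    cases (pvL c || pvDg c) <;> simp

theorem alt_eq (s : String) :
    reconhece_alt s =
      ((match s.toList.head? with | some c => pvL c | none => false) && pvTailB s.toList) := by
  unfold reconhece_alt
  cases s.toList with
  | nil => simp [pvTailB, pvLastD]
  | cons c rest =>
    simp only [List.isEmpty_cons, Bool.false_eq_true, if_false, List.head?_cons, pvTailB,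
      pvLastD, List.tail_cons, any_not_eq_not_all]
    cases hL : pvL c <;>
      cases hlast : (match (c :: rest).getLast? with | some d => pvDg d | none => false) <;>
        cases hall : (c :: rest).all (fun c => pvL c || pvDg c) <;> simp_all

theorem takeWhile_len_eq_iff (cs : List Char) (p : Char → Bool) :
    (cs.takeWhile p).length = cs.length ↔ cs.all p = true := by
  constructor
  · intro h
    have := (List.takeWhile_prefix (l := cs) (p := p)).eq_of_length h
    rw [List.all_eq_true]
    exact fun x hx => (List.takeWhile_eq_self_iff).mp this x hx
  · intro h
    rw [List.takeWhile_eq_self_iff.mpr (by rw [List.all_eq_true] at h; exact h)]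

theorem lens_split (cs : List Char) (p : Char → Bool) :
    (cs.takeWhile p).length + (cs.dropWhile p).length = cs.length := by
  conv_rhs => rw [← List.takeWhile_append_dropWhile (p := p) (l := cs)]
  rw [List.length_append]

theorem a_eq (s : String) :
    reconhece s =
      ((match s.toList.head? with | some c => pvL c | none => false) &&
        (!(s.toList.dropWhile pvL).isEmpty && (s.toList.dropWhile pvL).all pvDg)) := by
  unfold reconhece
  cases hcs : s.toList with
  | nil => simp
  | cons c rest =>
    have hW : pvWhileL (c :: rest) 0 = ((c :: rest).takeWhile pvL).length := by
      rw [pvWhileL_eq]; simp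
    simp only [List.head?_cons, List.length_cons]
    rw [if_neg (by omega : ¬(rest.length + 1 = 0))]
    cases hL : pvL c with
    | false =>
      have hz : pvWhileL (c :: rest) 0 = 0 := by
        rw [hW, List.takeWhile_cons, hL]; simp
      simp [hz]
    | true =>
      have htw : (c :: rest).takeWhile pvL = c :: rest.takeWhile pvL := by
        simp [hL]
      have hne0 : pvWhileL (c :: rest) 0 ≠ 0 := by rw [hW, htw]; simp
      by_cases hAll : ((c :: rest).dropWhile pvL).isEmpty = true
      · have hdw : (c :: rest).dropWhile pvL = [] := List.isEmpty_iff.mp hAll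
        have hlen : pvWhileL (c :: rest) 0 = rest.length + 1 := by
          rw [hW]
          have := lens_split (c :: rest) pvL
          rw [hdw] at this; simp at this
          simpa using this
        rw [hdw]
        simp [hlen]
      · have hdwne : ((c :: rest).dropWhile pvL).isEmpty = false := Bool.eq_false_iff.mpr hAll
        have hlt : pvWhileL (c :: rest) 0 ≠ rest.length + 1 := by
          rw [hW]
          intro h
          have h2 : ((c :: rest).takeWhile pvL).length = (c :: rest).length := by
            simpa using h
          have hl := lens_split (c :: rest) pvL
          rw [h2] at hl
          have h3 : (c :: rest).dropWhile pvL = [] :=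
            List.eq_nil_of_length_eq_zero (by simp at hl ⊢; omega)
          rw [h3] at hdwne; simp at hdwne
        have hWD : pvWhileD (c :: rest) (pvWhileL (c :: rest) 0) =
            ((c :: rest).takeWhile pvL).length +
              (((c :: rest).dropWhile pvL).takeWhile pvDg).length := by
          rw [hW, pvWhileD_eq, drop_takeWhile_length]
        have hcond : ¬(pvWhileL (c :: rest) 0 = 0 ∨ pvWhileL (c :: rest) 0 = rest.length + 1) := by
          rintro (h | h)
          · exact hne0 h
          · exact hlt h
        rw [if_neg hcond, hWD, hdwne]
        simp only [Bool.not_false, Bool.true_and]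
        have hl := lens_split (c :: rest) pvL
        cases hfin : ((c :: rest).dropWhile pvL).all pvDg with
        | true =>
          have := (takeWhile_len_eq_iff ((c :: rest).dropWhile pvL) pvDg).mpr hfin
          rw [beq_iff_eq]
          simp at hl ⊢; omega
        | false =>
          have hne : ((((c :: rest).dropWhile pvL).takeWhile pvDg)).length ≠
              ((c :: rest).dropWhile pvL).length := by
            intro h
            have := (takeWhile_len_eq_iff ((c :: rest).dropWhile pvL) pvDg).mp h
            rw [this] at hfin; cases hfin
          have hle := (List.takeWhile_prefix (p := pvDg) (l := (c :: rest).dropWhile pvL)).length_le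
          rw [beq_eq_false_iff_ne]
          simp at hl ⊢; omega

-- ===== VERDICT (by name: the statement is the Claim_ definition above) =====
theorem reconhece_spec : Claim_equal_reconhece := by
  intro s _
  unfold Spec_reconhece
  rw [a_eq, alt_eq, pvTailB_eq]
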